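-- pv_equiv track=rewrite | github.com/kusodama21/ain-15-puzzle-solver | charge_pd.py | _to_cs
-- ===== SOURCE A (Python) =====
-- def _to_cs(data, re):
--     cl = []  # Component list, which later will be converted to cache string
--
--     fst_re = True  # The first component is expected to be relevant, this will turn false after the first iteration
--     irr_pended = False  # Check if there are irrelevant tiles before the current process relevant tile
--     irr_num = 0  # The number of irrelevant tiles pended
--
--     for tile in data:
--         if tile in re or tile == 0:
--             if irr_pended:
--                 if fst_re:
--                     fst_re = False
--
--                 cl.append("i" + str(irr_num))
--                 irr_pended = False
--                 irr_num = 0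
--             if fst_re:
--                 cl.append(str(tile))
--                 fst_re = False
--             else:
--                 cl.append("." + str(tile))
--         else:
--             irr_num += 1
--             if not irr_pended:
--                 irr_pended = True
--
--     # Last check since the ending tile may not be relevant, as it will not pend the irrelevant tiles at the end
--     if irr_pended:
--         cl.append("i" + str(irr_num))
--
--     return "".join(cl)
-- ===== SOURCE B (Python) =====
-- def _to_cs(data, re):
--     out = []
--     first = True
--     i = 0
--     n = len(data)
--     while i < n:
--         t = data[i]
--         if t in re or t == 0:
--             out.append(str(t) if first else "." + str(t))
--             i += 1
--         else:
--             j = i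
--             while j < n and not (data[j] in re or data[j] == 0):
--                 j += 1
--             out.append("i" + str(j - i))
--             i = j
--         first = False
--     return "".join(out)
-- ===== Notes on version B (the rewrite author's own statement) =====
-- stated objective: simpler
-- what changed: Replaced A's single-pass state machine with fst_re/irr_pended/irr_num pending flags by an index scan that emits each relevant tile directly and each irrelevant run via one inner scan, with a single 'first' flag cleared after every token.
import Mathlib
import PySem

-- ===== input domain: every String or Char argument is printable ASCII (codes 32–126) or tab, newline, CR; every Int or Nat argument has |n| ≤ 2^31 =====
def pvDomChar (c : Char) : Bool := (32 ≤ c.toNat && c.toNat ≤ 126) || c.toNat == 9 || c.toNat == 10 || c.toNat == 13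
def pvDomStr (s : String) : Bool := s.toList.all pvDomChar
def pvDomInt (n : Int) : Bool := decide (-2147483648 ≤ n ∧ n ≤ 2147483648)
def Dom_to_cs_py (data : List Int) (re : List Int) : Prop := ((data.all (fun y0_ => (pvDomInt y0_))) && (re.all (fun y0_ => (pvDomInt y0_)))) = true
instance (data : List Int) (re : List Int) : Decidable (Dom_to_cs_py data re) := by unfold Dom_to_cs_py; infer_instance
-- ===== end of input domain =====

-- B replaces A's pending-flag state machine by an index scan that emits each
-- irrelevant run with one inner scan (objective: simpler; same cost).

-- ===== PORT A =====
-- A's for-loop over `data` with state (cl, fst_re, irr_pended, irr_num), as structural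
-- recursion; the trailing flush sits in the base case, "".join at the wrapper.
def aLoop (re : List Int) : List Int → List String → Bool → Bool → Int → List String
  | [], cl, _, pend, num =>
      if pend then cl ++ ["i" ++ PySem.Int.toStr num] else cl
  | tile :: rest, cl, fst, pend, num =>
      if tile ∈ re ∨ tile = 0 then
        -- flush the pended irrelevant run (this also clears fst_re)
        let cl1 := if pend then cl ++ ["i" ++ PySem.Int.toStr num] else cl
        let fst1 := if pend then false else fst
        let num1 : Int := if pend then 0 else num
        if fst1 then aLoop re rest (cl1 ++ [PySem.Int.toStr tile]) false false num1
        else aLoop re rest (cl1 ++ ["." ++ PySem.Int.toStr tile]) false false num1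
      else
        aLoop re rest cl fst true (num + 1)

def to_cs_py (data : List Int) (re : List Int) : String :=
  String.join (aLoop re data [] true false 0)

-- ===== PORT B =====
-- B's inner `while j < n and not relevant` scan: counts the irrelevant run, returns the remainder.
def takeIrr (re : List Int) : List Int → Int × List Int
  | [] => (0, [])
  | t :: rest =>
      if t ∈ re ∨ t = 0 then (0, t :: rest)
      else
        let p := takeIrr re rest
        (p.1 + 1, p.2)

theorem takeIrr_len (re : List Int) (l : List Int) : (takeIrr re l).2.length ≤ l.length := by
  induction l with
  | nil => simp [takeIrr]
  | cons t rest ih =>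
      simp only [takeIrr]
      split
      · simp
      · simpa using Nat.le_succ_of_le ih

-- B's outer while-loop (index i advancing ↦ consuming the list), accumulating `out`.
def bLoop (re : List Int) : List Int → Bool → List String → List String
  | [], _, out => out
  | t :: rest, first, out =>
      if t ∈ re ∨ t = 0 then
        bLoop re rest false (out ++ [if first then PySem.Int.toStr t else "." ++ PySem.Int.toStr t])
      else
        let p := takeIrr re rest
        bLoop re p.2 false (out ++ ["i" ++ PySem.Int.toStr (p.1 + 1)])
  termination_by l _ _ => l.length
  decreasing_by
    · simp
    · simpa using Nat.lt_succ_of_le (takeIrr_len re rest)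

def to_cs_py_alt (data : List Int) (re : List Int) : String :=
  String.join (bLoop re data true [])

-- ===== PRECONDITION & SPEC =====
def Spec_to_cs_py (data : List Int) (re : List Int) (out : String) : Prop := out = to_cs_py_alt data re
instance (data : List Int) (re : List Int) (out : String) : Decidable (Spec_to_cs_py data re out) := by unfold Spec_to_cs_py; infer_instance

-- ===== CLAIM (what is proved, stated in full; the proofs are below) =====
def Claim_equal_to_cs_py : Prop := ∀ (data : List Int) (re : List Int), Dom_to_cs_py data re → Spec_to_cs_py data re (to_cs_py data re)

-- ===== LEMMAS AND PROOFS =====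
-- A's accumulator splits off
theorem aLoop_acc (re : List Int) (data : List Int) :
    ∀ (cl : List String) (fst pend : Bool) (num : Int),
      aLoop re data cl fst pend num = cl ++ aLoop re data [] fst pend num := by
  induction data with
  | nil =>
      intro cl fst pend num
      cases pend <;> simp [aLoop]
  | cons t rest ih =>
      intro cl fst pend num
      simp only [aLoop]
      split
      · cases pend <;> cases fst <;> simp <;>
          (conv_rhs => rw [ih]) <;> rw [ih] <;> simp
      · exact ih cl fst true (num + 1)

-- B's accumulator splits off
theorem bLoop_acc_n (re : List Int) : ∀ (n : Nat) (data : List Int), data.length ≤ n →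
    ∀ (first : Bool) (out : List String),
      bLoop re data first out = out ++ bLoop re data first [] := by
  intro n
  induction n with
  | zero =>
      intro data hlen first out
      have : data = [] := List.eq_nil_of_length_eq_zero (Nat.le_zero.mp hlen)
      subst this; simp [bLoop]
  | succ n ih =>
      intro data hlen first out
      cases data with
      | nil => simp [bLoop]
      | cons t rest =>
          have hr : rest.length ≤ n := by simpa using hlen
          simp only [bLoop]
          by_cases h : t ∈ re ∨ t = 0
          · simp only [if_pos h]
            rw [ih rest hr]
            conv_rhs => rw [ih rest hr]
            simp
          · simp only [if_neg h]
            have hlen2 : (takeIrr re rest).2.length ≤ n :=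
              le_trans (takeIrr_len re rest) hr
            rw [ih _ hlen2]
            conv_rhs => rw [ih _ hlen2]
            simp

theorem bLoop_acc (re : List Int) (data : List Int) (first : Bool) (out : List String) :
    bLoop re data first out = out ++ bLoop re data first [] :=
  bLoop_acc_n re data.length data (le_refl _) first out

-- Main lemma: A's state machine ≡ B's run scanner, on empty accumulators, for both
-- pending states of A (pend = false with num = 0, and pend = true with any num).
theorem main_pq (re : List Int) : ∀ data : List Int,
    (∀ fst : Bool, aLoop re data [] fst false 0 = bLoop re data fst []) ∧
    (∀ (fst : Bool) (num : Int), aLoop re data [] fst true num =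
      ("i" ++ PySem.Int.toStr (num + (takeIrr re data).1)) :: bLoop re (takeIrr re data).2 false []) := by
  intro data
  induction data with
  | nil =>
      refine ⟨fun fst => by simp [aLoop, bLoop], fun fst num => ?_⟩
      simp [aLoop, bLoop, takeIrr]
  | cons t rest ih =>
      obtain ⟨ihP, ihQ⟩ := ih
      constructor
      · intro fst
        by_cases h : t ∈ re ∨ t = 0
        · have ha : aLoop re (t :: rest) [] fst false 0 =
              aLoop re rest [if fst then PySem.Int.toStr t else "." ++ PySem.Int.toStr t] false false 0 := by
            cases fst <;> simp [aLoop, h]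
          have hb : bLoop re (t :: rest) fst [] =
              bLoop re rest false [if fst then PySem.Int.toStr t else "." ++ PySem.Int.toStr t] := by
            cases fst <;> simp [bLoop, h]
          rw [ha, hb, aLoop_acc, bLoop_acc, ihP false]
        · have ha : aLoop re (t :: rest) [] fst false 0 = aLoop re rest [] fst true 1 := by
            simp [aLoop, h]
          have hb : bLoop re (t :: rest) fst [] =
              ("i" ++ PySem.Int.toStr ((takeIrr re rest).1 + 1)) :: bLoop re (takeIrr re rest).2 false [] := by
            rw [show bLoop re (t :: rest) fst [] =
                bLoop re (takeIrr re rest).2 false ["i" ++ PySem.Int.toStr ((takeIrr re rest).1 + 1)] by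
              simp [bLoop, h]]
            rw [bLoop_acc]; simp
          have harith : (1 : Int) + (takeIrr re rest).1 = (takeIrr re rest).1 + 1 := by ring
          rw [ha, hb, ihQ fst 1, harith]
      · intro fst num
        by_cases h : t ∈ re ∨ t = 0
        · have htk : takeIrr re (t :: rest) = (0, t :: rest) := by simp [takeIrr, h]
          have hb : bLoop re (t :: rest) false [] =
              ("." ++ PySem.Int.toStr t) :: bLoop re rest false [] := by
            rw [show bLoop re (t :: rest) false [] =
                bLoop re rest false ["." ++ PySem.Int.toStr t] by simp [bLoop, h]]
            rw [bLoop_acc]; simp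
          have ha : aLoop re (t :: rest) [] fst true num =
              aLoop re rest ["i" ++ PySem.Int.toStr num, "." ++ PySem.Int.toStr t] false false 0 := by
            cases fst <;> simp [aLoop, h]
          rw [htk, ha, aLoop_acc, ihP false, hb]
          simp
        · have htk : takeIrr re (t :: rest) = ((takeIrr re rest).1 + 1, (takeIrr re rest).2) := by
            simp [takeIrr, h]
          have ha : aLoop re (t :: rest) [] fst true num = aLoop re rest [] fst true (num + 1) := by
            simp [aLoop, h]
          have harith : num + 1 + (takeIrr re rest).1 = num + ((takeIrr re rest).1 + 1) := by ring
          rw [htk, ha, ihQ fst (num + 1), harith]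

-- ===== VERDICT (by name: the statement is the Claim_ definition above) =====
theorem to_cs_py_spec : Claim_equal_to_cs_py := by
  intro data re _
  unfold Spec_to_cs_py to_cs_py to_cs_py_alt
  rw [(main_pq re data).1 true]
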